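-- pv_equiv track=rewrite | github.com/faludiz/DiMap_Pad_to_Job | dimappad2job.py | get_ts_data
-- ===== SOURCE A (Python) =====
-- def get_ts_data(info):
--     """Extract TS information from the given data."""
--     deviceModel = ""
--     deviceSn = ""
--
--     for i in range(len(info)):
--         sdata = info[i].split(':')
--         if len(sdata) > 1:
--             if sdata[0] == "deviceModel":
--                 deviceModel = sdata[1]
--             if sdata[0] == "deviceSn":
--                 deviceSn = sdata[1]
--     return [deviceModel, deviceSn]
-- ===== SOURCE B (Python) =====
-- def get_ts_data(info):
--     """Extract TS information from the given data."""
--     def find(key):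
--         for line in reversed(info):
--             parts = line.split(':')
--             if len(parts) > 1 and parts[0] == key:
--                 return parts[1]
--         return ""
--     return [find("deviceModel"), find("deviceSn")]
-- ===== Notes on version B (the rewrite author's own statement) =====
-- stated objective: alternative
-- what changed: Replaces A's single forward pass that overwrites two accumulator variables with two independent backward early-exit searches: for each key, scan the list in reverse and return the value of the first matching line (the forward last-wins winner).
import Mathlib
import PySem

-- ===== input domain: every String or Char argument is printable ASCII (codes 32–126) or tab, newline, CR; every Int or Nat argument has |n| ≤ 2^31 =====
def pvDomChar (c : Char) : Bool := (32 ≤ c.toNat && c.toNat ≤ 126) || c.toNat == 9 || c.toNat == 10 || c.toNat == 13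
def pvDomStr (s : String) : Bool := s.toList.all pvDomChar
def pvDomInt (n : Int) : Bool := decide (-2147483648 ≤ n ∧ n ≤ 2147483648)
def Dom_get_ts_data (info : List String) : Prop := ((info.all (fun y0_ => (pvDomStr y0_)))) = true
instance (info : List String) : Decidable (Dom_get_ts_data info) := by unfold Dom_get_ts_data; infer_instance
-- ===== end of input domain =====

-- B replaces A's single forward pass with two independent backward early-exit searches (first match in reverse = forward last-wins); same cost, different traversal.

-- ===== PORT A =====
-- loop body of A: one line updates the (deviceModel, deviceSn) accumulator pair
def pvStepA (st : String × String) (line : String) : String × String :=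
  let sdata := (PySem.Str.split? line ":").getD []   -- ':' ≠ "", so split? is always `some` (exact for line.split(':'))
  if sdata.length > 1 then
    (if sdata.getD 0 "" = "deviceModel" then sdata.getD 1 "" else st.1,
     if sdata.getD 0 "" = "deviceSn" then sdata.getD 1 "" else st.2)
  else st

def get_ts_data (info : List String) : List String :=
  let st := (PySem.List.pyRange 0 (info.length : Int) 1).foldl
    (fun st i => pvStepA st (PySem.List.pyGetD info i "")) ("", "")
  [st.1, st.2]

-- ===== PORT B =====
-- Source B's inner `find(key)`: early-exit scan, called on the reversed list
def pvFind (key : String) : List String → String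
  | [] => ""
  | line :: rest =>
    let parts := (PySem.Str.split? line ":").getD []
    if parts.length > 1 ∧ parts.getD 0 "" = key then parts.getD 1 "" else pvFind key rest

def get_ts_data_alt (info : List String) : List String :=
  [pvFind "deviceModel" info.reverse, pvFind "deviceSn" info.reverse]

-- ===== PRECONDITION & SPEC =====
def Spec_get_ts_data (info : List String) (out : List String) : Prop := out = get_ts_data_alt info
instance (info : List String) (out : List String) : Decidable (Spec_get_ts_data info out) := by unfold Spec_get_ts_data; infer_instance

-- ===== CLAIM (what is proved, stated in full; the proofs are below) =====
def Claim_equal_get_ts_data : Prop := ∀ (info : List String), Dom_get_ts_data info → Spec_get_ts_data info (get_ts_data info)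

-- ===== LEMMAS AND PROOFS =====

-- pvFind generalized with a default value (so it can absorb A's running accumulator)
def pvFindD (key d : String) : List String → String
  | [] => d
  | line :: rest =>
    let parts := (PySem.Str.split? line ":").getD []
    if parts.length > 1 ∧ parts.getD 0 "" = key then parts.getD 1 "" else pvFindD key d rest

theorem pvFindD_nil_default (key : String) (l : List String) : pvFindD key "" l = pvFind key l := by
  induction l with
  | nil => rfl
  | cons x xs ih => simp only [pvFindD, pvFind, ih]

-- the result of one more (forward-later) line x folds into the DEFAULT of the backward search
def pvHit (key : String) (line d : String) : String :=
  let parts := (PySem.Str.split? line ":").getD []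
  if parts.length > 1 ∧ parts.getD 0 "" = key then parts.getD 1 "" else d

theorem pvFindD_append (key d x : String) (ys : List String) :
    pvFindD key d (ys ++ [x]) = pvFindD key (pvHit key x d) ys := by
  induction ys with
  | nil => simp only [List.nil_append, pvFindD, pvHit]
  | cons y ys ih => simp only [List.cons_append, pvFindD, ih]

-- Loop invariant: A's pair of accumulators = the two backward searches with those accumulators as defaults.
theorem get_ts_data_inv (l : List String) (a b : String) :
    l.foldl pvStepA (a, b) = (pvFindD "deviceModel" a l.reverse, pvFindD "deviceSn" b l.reverse) := by
  induction l generalizing a b with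
  | nil => rfl
  | cons x xs ih =>
    simp only [List.foldl_cons, List.reverse_cons, pvFindD_append]
    have h1 : (pvStepA (a, b) x).1 = pvHit "deviceModel" x a := by
      simp only [pvStepA, pvHit]
      split_ifs <;> simp_all
    have h2 : (pvStepA (a, b) x).2 = pvHit "deviceSn" x b := by
      simp only [pvStepA, pvHit]
      split_ifs <;> simp_all
    rw [← h1, ← h2, ← ih (pvStepA (a, b) x).1 (pvStepA (a, b) x).2]

-- ===== VERDICT (by name: the statement is the Claim_ definition above) =====
theorem get_ts_data_spec : Claim_equal_get_ts_data := by
  intro info _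
  unfold Spec_get_ts_data get_ts_data get_ts_data_alt
  rw [PySem.List.foldl_pyRange_pyGetD' (a := 0) (xs := info) (d := "") (f := pvStepA) (init := ("", "")) (by omega)]
  simp only [Int.toNat_zero, List.drop_zero]
  rw [get_ts_data_inv, pvFindD_nil_default, pvFindD_nil_default]
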